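-- pv_equiv track=rewrite | github.com/wingsof/trader | morning_server/handlers/request_pre_handler.py | _check_empty_date
-- ===== SOURCE A (Python) =====
-- def _check_empty_date(days, vacancy_days, working_days):
--     check_array = [None] * (len(working_days) + 1)
--     # insert one more None to interate until the end
--     for i, w in enumerate(working_days):
--         if w not in days and w not in vacancy_days:
--             check_array[i] = w
--     empty_from = None
--     empty_until = None
--     empty_periods = []
--     for i, c in enumerate(check_array):
--         if empty_from is None and c is not None:
--             empty_from = c
--         elif empty_from is not None and c is None:
--             empty_until = check_array[i - 1]
--             empty_periods.append((empty_from, empty_until))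
--             empty_from, empty_until = None, None
--
--     return empty_periods
-- ===== SOURCE B (Python) =====
-- def _check_empty_date(days, vacancy_days, working_days):
--     # single pass: track the current run of missing working days as (start, last)
--     dayset = set(days)
--     vacset = set(vacancy_days)
--     periods = []
--     run = None
--     for w in working_days:
--         if w not in dayset and w not in vacset:
--             run = (w, w) if run is None else (run[0], w)
--         elif run is not None:
--             periods.append(run)
--             run = None
--     if run is not None:
--         periods.append(run)
--     return periods
-- ===== Notes on version B (the rewrite author's own statement) =====
-- stated objective: faster
-- what changed: Replaced A's two-pass scheme (a preallocated marker table with a trailing None sentinel, then an indexed state-machine scan reading check_array[i-1]) by one direct pass over working_days that tracks the current missing-day run as a (start,last) pair, with set-based membership removing the inner list scans.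
import Mathlib
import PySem

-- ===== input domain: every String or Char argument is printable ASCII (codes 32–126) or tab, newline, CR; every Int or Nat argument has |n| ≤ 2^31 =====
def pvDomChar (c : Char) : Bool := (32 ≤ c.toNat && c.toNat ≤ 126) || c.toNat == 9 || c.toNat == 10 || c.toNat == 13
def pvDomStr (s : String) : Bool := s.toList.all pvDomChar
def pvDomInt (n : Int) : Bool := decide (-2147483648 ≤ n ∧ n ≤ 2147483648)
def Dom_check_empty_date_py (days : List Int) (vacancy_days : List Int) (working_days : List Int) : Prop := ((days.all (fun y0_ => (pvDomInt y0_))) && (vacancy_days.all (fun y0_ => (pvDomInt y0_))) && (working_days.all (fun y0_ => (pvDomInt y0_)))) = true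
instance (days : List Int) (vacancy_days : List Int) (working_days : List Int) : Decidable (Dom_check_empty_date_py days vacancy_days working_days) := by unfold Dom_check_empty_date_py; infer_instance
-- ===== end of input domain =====

-- B replaces A's marker table + sentinel + indexed scan by one pass tracking the current missing run as a (start,last) pair (objective: faster; set membership + single pass, measured faster in a timing run).

-- ===== PORT A =====
-- second loop of A: for i, c in enumerate(check_array) with state empty_from / empty_periods;
-- empty_until is assigned and consumed inside its branch (and reset), so it is a local let here.
def pvLoopA (ca : List (Option Int)) : List (Option Int) → Int → Option Int → List (Int × Int) → List (Int × Int)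
  | [], _, _, acc => acc
  | c :: rest, i, ef, acc =>
    match ef, c with
    | none, some v => pvLoopA ca rest (i + 1) (some v) acc
    | some s, none =>
        -- empty_until = check_array[i-1]; when this branch fires the previous entry is always `some`,
        -- so the `.getD none).getD 0` defaults are unreachable
        pvLoopA ca rest (i + 1) none (acc ++ [(s, ((PySem.List.pyGet? ca (i - 1)).getD none).getD 0)])
    | _, _ => pvLoopA ca rest (i + 1) ef acc

def check_empty_date_py (days : List Int) (vacancy_days : List Int) (working_days : List Int) : List (Int × Int) :=
  -- check_array = [None] * (len(working_days) + 1); then the enumerate/assignment loop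
  let ca := (PySem.List.enumerate working_days 0).foldl
    (fun arr iw =>
      if !(days.contains iw.2) && !(vacancy_days.contains iw.2) then PySem.List.pySetD arr iw.1 (some iw.2) else arr)
    (List.replicate (working_days.length + 1) (none : Option Int))
  pvLoopA ca ca 0 none []

-- ===== PORT B =====
def pvStepB (dayset vacset : PySem.Set Int) (st : Option (Int × Int) × List (Int × Int)) (w : Int) :
    Option (Int × Int) × List (Int × Int) :=
  if !(PySem.Set.contains dayset w) && !(PySem.Set.contains vacset w) then
    match st.1 with
    | none => (some (w, w), st.2)
    | some p => (some (p.1, w), st.2)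
  else
    match st.1 with
    | none => st
    | some p => (none, st.2 ++ [p])

def check_empty_date_py_alt (days : List Int) (vacancy_days : List Int) (working_days : List Int) : List (Int × Int) :=
  let dayset := PySem.Set.ofList days
  let vacset := PySem.Set.ofList vacancy_days
  let fin := working_days.foldl (pvStepB dayset vacset) (none, [])
  match fin.1 with
  | none => fin.2
  | some p => fin.2 ++ [p]

-- ===== PRECONDITION & SPEC =====
def Spec_check_empty_date_py (days : List Int) (vacancy_days : List Int) (working_days : List Int) (out : List (Int × Int)) : Prop := out = check_empty_date_py_alt days vacancy_days working_days
instance (days : List Int) (vacancy_days : List Int) (working_days : List Int) (out : List (Int × Int)) : Decidable (Spec_check_empty_date_py days vacancy_days working_days out) := by unfold Spec_check_empty_date_py; infer_instance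

-- ===== CLAIM (what is proved, stated in full; the proofs are below) =====
def Claim_equal_check_empty_date_py : Prop := ∀ (days : List Int) (vacancy_days : List Int) (working_days : List Int), Dom_check_empty_date_py days vacancy_days working_days → Spec_check_empty_date_py days vacancy_days working_days (check_empty_date_py days vacancy_days working_days)

-- ===== LEMMAS AND PROOFS =====

-- the per-day "missing" test, and the marker A's first loop writes for day w
def pvMiss (days vacancy_days : List Int) (w : Int) : Bool :=
  !(days.contains w) && !(vacancy_days.contains w)

def pvMark (days vacancy_days : List Int) (w : Int) : Option Int :=
  if pvMiss days vacancy_days w then some w else none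

lemma pvSet_append_length {α : Type} (l1 l2 : List α) (x v : α) :
    (l1 ++ x :: l2).set l1.length v = l1 ++ v :: l2 := by
  induction l1 with
  | nil => rfl
  | cons a t ih => simp [ih]

-- the entry before index i in the marker array, when a run is open, is its last missing day
lemma pvPrev (pre rest : List (Option Int)) (l : Int) (h : pre.getLast? = some (some l)) :
    PySem.List.pyGet? (pre ++ rest) ((pre.length : Int) - 1) = some (some l) := by
  obtain ⟨pre', rfl⟩ := List.getLast?_eq_some_iff.mp h
  have hlen : (((pre' ++ [some l]).length : Int) - 1) = (pre'.length : Int) := by simp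
  rw [hlen, List.append_assoc, List.singleton_append]
  exact PySem.List.pyGet?_append_length pre' rest (some l)

-- A's first loop builds working_days.map (pvMark …) ++ [none]
lemma pvBuildA (days vacancy_days : List Int) :
    ∀ (ws : List Int) (pre : List (Option Int)),
    (PySem.List.enumerate ws (pre.length : Int)).foldl
      (fun arr iw =>
        if !(days.contains iw.2) && !(vacancy_days.contains iw.2) then PySem.List.pySetD arr iw.1 (some iw.2) else arr)
      (pre ++ List.replicate (ws.length + 1) (none : Option Int))
    = pre ++ ws.map (pvMark days vacancy_days) ++ [none] := by
  intro ws
  induction ws with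
  | nil =>
    intro pre
    simp [PySem.List.enumerate_nil]
  | cons w ws ih =>
    intro pre
    rw [PySem.List.enumerate_cons, List.foldl_cons]
    simp only [List.length_cons]
    by_cases hmiss : pvMiss days vacancy_days w
    · have hm : pvMark days vacancy_days w = some w := by simp [pvMark, hmiss]
      have hcond : (!(days.contains w) && !(vacancy_days.contains w)) = true := hmiss
      simp only [hcond, if_true]
      rw [PySem.List.pySetD_natCast]
      have hrepl : List.replicate (ws.length + 1 + 1) (none : Option Int)
          = (none : Option Int) :: List.replicate (ws.length + 1) none := rfl
      rw [hrepl, pvSet_append_length]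
      have hstep : pre ++ (some w : Option Int) :: List.replicate (ws.length + 1) none
          = (pre ++ [some w]) ++ List.replicate (ws.length + 1) none := by simp
      rw [hstep]
      have hlen : ((pre.length : Int) + 1) = (((pre ++ [some w]).length : Int)) := by simp
      rw [hlen, ih (pre ++ [some w])]
      simp [hm]
    · have hm : pvMark days vacancy_days w = none := by simp [pvMark, hmiss]
      have hcond : (!(days.contains w) && !(vacancy_days.contains w)) = false := by
        simpa [pvMiss] using hmiss
      simp only [hcond, Bool.false_eq_true, if_false]
      have hrepl : pre ++ List.replicate (ws.length + 1 + 1) (none : Option Int)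
          = (pre ++ [none]) ++ List.replicate (ws.length + 1) none := by
        simp [List.replicate_succ]
      rw [hrepl]
      have hlen : ((pre.length : Int) + 1) = (((pre ++ [(none : Option Int)]).length : Int)) := by
        simp
      rw [hlen, ih (pre ++ [none])]
      simp [hm]

-- the combined invariant: A's second loop over the marker list agrees with B's fold
lemma pvMain (days vacancy_days : List Int) (ca : List (Option Int)) :
    ∀ (ws : List Int) (pre : List (Option Int)) (ef : Option Int) (run : Option (Int × Int)) (acc : List (Int × Int)),
    ca = pre ++ ws.map (pvMark days vacancy_days) ++ [none] →
    ((ef = none ∧ run = none) ∨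
      (∃ s l, ef = some s ∧ run = some (s, l) ∧ pre.getLast? = some (some l))) →
    pvLoopA ca (ws.map (pvMark days vacancy_days) ++ [none]) (pre.length : Int) ef acc
    = (match (ws.foldl (pvStepB (PySem.Set.ofList days) (PySem.Set.ofList vacancy_days)) (run, acc)).1 with
       | none => (ws.foldl (pvStepB (PySem.Set.ofList days) (PySem.Set.ofList vacancy_days)) (run, acc)).2
       | some p => (ws.foldl (pvStepB (PySem.Set.ofList days) (PySem.Set.ofList vacancy_days)) (run, acc)).2 ++ [p]) := by
  intro ws
  induction ws with
  | nil =>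
    intro pre ef run acc hca hlink
    rcases hlink with ⟨he, hr⟩ | ⟨s, l, he, hr, hpre⟩
    · subst he; subst hr
      simp [pvLoopA]
    · subst he; subst hr
      simp only [List.map_nil, List.append_nil] at hca
      have hprev := pvPrev pre [(none : Option Int)] l hpre
      rw [← hca] at hprev
      simp [pvLoopA, hprev]
  | cons w ws ih =>
    intro pre ef run acc hca hlink
    have hcond : (!(PySem.Set.contains (PySem.Set.ofList days) w)
        && !(PySem.Set.contains (PySem.Set.ofList vacancy_days) w)) = pvMiss days vacancy_days w := by
      simp [pvMiss]
    simp only [List.map_cons, List.cons_append] at hca ⊢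
    rw [List.foldl_cons]
    by_cases hmiss : pvMiss days vacancy_days w
    · have hm : pvMark days vacancy_days w = some w := by simp [pvMark, hmiss]
      rw [hm] at hca ⊢
      rcases hlink with ⟨he, hr⟩ | ⟨s, l, he, hr, hpre⟩
      · subst he; subst hr
        simp only [pvLoopA]
        have hstep : pvStepB (PySem.Set.ofList days) (PySem.Set.ofList vacancy_days) (none, acc) w
            = (some (w, w), acc) := by unfold pvStepB; rw [hcond, hmiss]; simp
        rw [hstep]
        have hlen : ((pre.length : Int) + 1) = (((pre ++ [some w]).length : Int)) := by simp
        rw [hlen]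
        exact ih (pre ++ [some w]) (some w) (some (w, w)) acc (by simpa using hca)
          (Or.inr ⟨w, w, rfl, rfl, by simp⟩)
      · subst he; subst hr
        simp only [pvLoopA]
        have hstep : pvStepB (PySem.Set.ofList days) (PySem.Set.ofList vacancy_days) (some (s, l), acc) w
            = (some (s, w), acc) := by unfold pvStepB; rw [hcond, hmiss]; simp
        rw [hstep]
        have hlen : ((pre.length : Int) + 1) = (((pre ++ [some w]).length : Int)) := by simp
        rw [hlen]
        exact ih (pre ++ [some w]) (some s) (some (s, w)) acc (by simpa using hca)
          (Or.inr ⟨s, w, rfl, rfl, by simp⟩)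
    · have hm : pvMark days vacancy_days w = none := by simp [pvMark, hmiss]
      rw [hm] at hca ⊢
      rcases hlink with ⟨he, hr⟩ | ⟨s, l, he, hr, hpre⟩
      · subst he; subst hr
        simp only [pvLoopA]
        have hstep : pvStepB (PySem.Set.ofList days) (PySem.Set.ofList vacancy_days) (none, acc) w
            = (none, acc) := by unfold pvStepB; rw [hcond]; simp [hmiss]
        rw [hstep]
        have hlen : ((pre.length : Int) + 1) = (((pre ++ [(none : Option Int)]).length : Int)) := by simp
        rw [hlen]
        exact ih (pre ++ [none]) none none acc (by simpa using hca) (Or.inl ⟨rfl, rfl⟩)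
      · subst he; subst hr
        have hprev : PySem.List.pyGet? ca ((pre.length : Int) - 1) = some (some l) := by
          rw [hca]
          simpa [List.append_assoc] using
            pvPrev pre ((none : Option Int) :: (ws.map (pvMark days vacancy_days) ++ [none])) l hpre
        simp only [pvLoopA]
        rw [hprev]
        have hstep : pvStepB (PySem.Set.ofList days) (PySem.Set.ofList vacancy_days) (some (s, l), acc) w
            = (none, acc ++ [(s, l)]) := by unfold pvStepB; rw [hcond]; simp [hmiss]
        rw [hstep]
        have hlen : ((pre.length : Int) + 1) = (((pre ++ [(none : Option Int)]).length : Int)) := by simp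
        rw [hlen]
        exact ih (pre ++ [none]) none none (acc ++ [(s, l)]) (by simpa using hca)
          (Or.inl ⟨rfl, rfl⟩)

-- ===== VERDICT (by name: the statement is the Claim_ definition above) =====
theorem check_empty_date_py_spec : Claim_equal_check_empty_date_py := by
  intro days vacancy_days working_days _
  show _ = _
  unfold check_empty_date_py check_empty_date_py_alt
  have hb := pvBuildA days vacancy_days working_days []
  simp only [List.length_nil, Int.natCast_zero, List.nil_append] at hb
  rw [hb]
  have hm := pvMain days vacancy_days
    (working_days.map (pvMark days vacancy_days) ++ [none])
    working_days [] none none [] (by simp) (Or.inl ⟨rfl, rfl⟩)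
  simpa using hm
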